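-- pv_equiv track=rewrite | github.com/Chris8765/Python_programs | solver.py | the_same_values_in_list_th
-- ===== SOURCE A (Python) =====
-- def the_same_values_in_list_th(values_to_control_only_rank_th):
--
--     values_dic = {}
--     string_the_same_values =""
--
--     for value in values_to_control_only_rank_th:
--
--         if values_to_control_only_rank_th[value] in values_dic:
--
--             values_dic[values_to_control_only_rank_th[value]] += 1 #counter that sums up the hands of cards of the same value
--         else:
--             values_dic.update({values_to_control_only_rank_th[value]:1})
--
--
--
--     if max(values_dic.values()) == 1:
--         return True, None, None # no hand of cards of the same strength
--     else:
--
--         for value in values_dic.values():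
--             if value != 1:
--                 card_value = [k for k, v in values_dic.items() if v > 1]                                #defining a set of cards of the same strength
--                 card_name = [k for k, v in values_to_control_only_rank_th.items() if v == card_value[0]]
--
--                 card_name.sort()
--                 cards_to_remove = card_name                                 #Card sets that will have to be removed, because they will be replaced by a text string of card sets with the same strength
--                 for card in card_name:
--                     string_the_same_values += card +"="                     #Create a text string containing card layouts with the same strength along with the "=" sign
--
--                 return(False, string_the_same_values[:-1], cards_to_remove)
-- ===== SOURCE B (Python) =====
-- def the_same_values_in_list_th(values_to_control_only_rank_th):
--     # Group card names by rank in one pass, then report the first rank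
--     # (in first-occurrence order) that owns more than one name.
--     groups = {}
--     for name, rank in values_to_control_only_rank_th.items():
--         groups.setdefault(rank, []).append(name)
--     for names in groups.values():
--         if len(names) > 1:
--             names = sorted(names)
--             return False, "=".join(names), names
--     return True, None, None
-- ===== Notes on version B (the rewrite author's own statement) =====
-- stated objective: simpler
-- what changed: B groups card names by rank in a single pass and reads the answer off the first oversized group, replacing A's count-dict plus three separate rescans (comprehension over counts, comprehension over the input, manual '='-join with a trailing-character chop) with one grouping dict and str.join.
import Mathlib
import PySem

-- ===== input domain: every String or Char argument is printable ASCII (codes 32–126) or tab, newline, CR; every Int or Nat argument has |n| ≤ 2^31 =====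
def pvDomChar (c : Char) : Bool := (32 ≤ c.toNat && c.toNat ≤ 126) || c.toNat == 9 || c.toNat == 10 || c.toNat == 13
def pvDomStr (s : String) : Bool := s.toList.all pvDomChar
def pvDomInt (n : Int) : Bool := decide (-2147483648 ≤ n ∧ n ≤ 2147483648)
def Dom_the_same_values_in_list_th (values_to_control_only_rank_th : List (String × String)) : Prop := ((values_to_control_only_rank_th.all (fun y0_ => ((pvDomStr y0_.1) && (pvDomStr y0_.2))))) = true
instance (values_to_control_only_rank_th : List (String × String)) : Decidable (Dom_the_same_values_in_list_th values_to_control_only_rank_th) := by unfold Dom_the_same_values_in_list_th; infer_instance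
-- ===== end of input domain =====

-- B groups names by rank in one pass instead of A's count-dict plus three rescans; equivalence is
-- proved on non-empty inputs with distinct keys (A raises ValueError on the empty dict; see Pre_ below).

-- ===== PORT A =====
-- dict lookup values_to_control_only_rank_th[value] (first match; keys are distinct under Pre_)
def pvLookup (l : List (String × String)) (k : String) : String :=
  ((l.find? (fun p => p.1 == k)).map Prod.snd).getD ""

-- values_dic[r] += 1 (in-place increment of the entry with key r)
def pvIncr : List (String × Int) → String → List (String × Int)
  | [], _ => []
  | (a, b) :: t, k => if a == k then (a, b + 1) :: t else (a, b) :: pvIncr t k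

def the_same_values_in_list_th (values_to_control_only_rank_th : List (String × String)) : Bool × Option String × Option (List String) :=
  let values_dic : List (String × Int) :=
    values_to_control_only_rank_th.foldl (fun d value =>
      let r := pvLookup values_to_control_only_rank_th value.1
      if d.any (fun p => p.1 == r) then pvIncr d r else d ++ [(r, 1)]) []
  let vals := values_dic.map Prod.snd
  match PySem.List.max? vals (fun v => v) with
  | none => (true, none, none)      -- Python: max([]) raises ValueError; excluded by Pre_
  | some m =>
    if m == 1 then (true, none, none)
    else
      match vals.find? (fun v => decide (v ≠ 1)) with
      | none => (true, none, none)  -- unreachable (the Python loop would fall through)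
      | some _ =>
        let card_value := (values_dic.filter (fun p => decide (1 < p.2))).map Prod.fst
        let card_name := (values_to_control_only_rank_th.filter
            (fun p => p.2 == card_value.head?.getD "")).map Prod.fst
        let card_name := PySem.List.sorted card_name (fun x => x) false
        let s := card_name.foldl (fun acc card => acc ++ card ++ "=") ""
        (false, some (PySem.Str.slice s none (some (-1))), some card_name)

-- ===== PORT B =====
-- groups.setdefault(rank, []).append(name)
def pvGAdd : List (String × List String) → String → String → List (String × List String)
  | [], r, n => [(r, [n])]
  | (a, ns) :: t, r, n => if a == r then (a, ns ++ [n]) :: t else (a, ns) :: pvGAdd t r n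

def the_same_values_in_list_th_alt (values_to_control_only_rank_th : List (String × String)) : Bool × Option String × Option (List String) :=
  let groups : List (String × List String) :=
    values_to_control_only_rank_th.foldl (fun g p => pvGAdd g p.2 p.1) []
  match groups.find? (fun q => decide (q.2.length > 1)) with
  | some q =>
    let names := PySem.List.sorted q.2 (fun x => x) false
    (false, some (PySem.Str.join "=" names), some names)
  | none => (true, none, none)

-- ===== PRECONDITION & SPEC =====
-- Pre_ excludes the empty input (A's max() raises ValueError there) and inputs whose association
-- list carries a duplicate key, which a Python dict cannot represent (Python collapses them).
def Pre_the_same_values_in_list_th (values_to_control_only_rank_th : List (String × String)) : Prop :=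
  values_to_control_only_rank_th ≠ [] ∧ (values_to_control_only_rank_th.map Prod.fst).Nodup
instance (values_to_control_only_rank_th : List (String × String)) : Decidable (Pre_the_same_values_in_list_th values_to_control_only_rank_th) := by unfold Pre_the_same_values_in_list_th; infer_instance

def pvWitness_the_same_values_in_list_th : (List (String × String)) := [("a", "2"), ("b", "2")]

def Spec_the_same_values_in_list_th (values_to_control_only_rank_th : List (String × String)) (out : Bool × Option String × Option (List String)) : Prop := out = the_same_values_in_list_th_alt values_to_control_only_rank_th
instance (values_to_control_only_rank_th : List (String × String)) (out : Bool × Option String × Option (List String)) : Decidable (Spec_the_same_values_in_list_th values_to_control_only_rank_th out) := by unfold Spec_the_same_values_in_list_th; infer_instance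

-- ===== CLAIM (what is proved, stated in full; the proofs are below) =====
def Claim_equal_the_same_values_in_list_th : Prop := ∀ (values_to_control_only_rank_th : List (String × String)), Dom_the_same_values_in_list_th values_to_control_only_rank_th → Pre_the_same_values_in_list_th values_to_control_only_rank_th → Spec_the_same_values_in_list_th values_to_control_only_rank_th (the_same_values_in_list_th values_to_control_only_rank_th)
-- ===== LEMMAS AND PROOFS =====

-- A's lookup of a key of l returns that pair's value when keys are distinct.
theorem pvFind?_of_nodup {β : Type} (l : List (String × β)) (p : String × β)
    (hnd : (l.map Prod.fst).Nodup) (hp : p ∈ l) :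
    l.find? (fun q => q.1 == p.1) = some p := by
  induction l with
  | nil => cases hp
  | cons h t ih =>
    simp only [List.map_cons, List.nodup_cons] at hnd
    rcases List.mem_cons.mp hp with rfl | hpt
    · simp [List.find?]
    · have hne : ¬ (h.1 == p.1) = true := by
        intro he
        exact hnd.1 (by
          have : h.1 = p.1 := by simpa using he
          rw [this]; exact List.mem_map.mpr ⟨p, hpt, rfl⟩)
      simp only [List.find?, hne]
      exact ih hnd.2 hpt

-- the counting step of A, with the rank already in hand
def pvCStep (d : List (String × Int)) (r : String) : List (String × Int) :=
  if d.any (fun p => p.1 == r) then pvIncr d r else d ++ [(r, 1)]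

def pvLen (q : String × List String) : String × Int := (q.1, q.2.length)

theorem mapLen_pvGAdd (g : List (String × List String)) (r n : String) :
    (pvGAdd g r n).map pvLen = pvCStep (g.map pvLen) r := by
  induction g with
  | nil => simp [pvGAdd, pvCStep, pvLen]
  | cons h t ih =>
    obtain ⟨a, ns⟩ := h
    by_cases hr : (a == r) = true
    · simp [pvGAdd, pvCStep, pvIncr, pvLen, hr]
    · simp only [pvGAdd, hr, List.map_cons, pvCStep, List.any_cons, pvLen,
        Bool.false_or]
      by_cases hany : ((t.map pvLen).any fun p => p.1 == r) = true
      · simp only [hany, if_true, pvIncr, hr]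
        have := ih
        simp only [pvCStep, hany, if_true] at this
        simp [this, pvLen]
      · simp only [hany, List.cons_append]
        have := ih
        simp only [pvCStep, hany] at this
        simp [this, pvLen]

theorem mapLen_foldl (l : List (String × String)) (g : List (String × List String)) :
    (l.foldl (fun g p => pvGAdd g p.2 p.1) g).map pvLen
      = l.foldl (fun d p => pvCStep d p.2) (g.map pvLen) := by
  induction l generalizing g with
  | nil => rfl
  | cons h t ih => simp only [List.foldl_cons, ih, mapLen_pvGAdd]

-- group lists are never empty
theorem pvGAdd_snd_ne_nil (g : List (String × List String)) (r n : String)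
    (hg : ∀ q ∈ g, q.2 ≠ []) : ∀ q ∈ pvGAdd g r n, q.2 ≠ [] := by
  induction g with
  | nil => simp [pvGAdd]
  | cons h t ih =>
    obtain ⟨a, ns⟩ := h
    by_cases hr : (a == r) = true
    · simp only [pvGAdd, hr, if_true]
      intro q hq
      rcases List.mem_cons.mp hq with rfl | hqt
      · simp
      · exact hg q (List.mem_cons_of_mem _ hqt)
    · simp only [pvGAdd, hr]
      intro q hq
      rcases List.mem_cons.mp hq with rfl | hqt
      · exact hg _ (List.mem_cons_self ..)
      · exact ih (fun q hq => hg q (List.mem_cons_of_mem _ hq)) q hqt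

theorem foldl_snd_ne_nil (l : List (String × String)) (g : List (String × List String))
    (hg : ∀ q ∈ g, q.2 ≠ []) :
    ∀ q ∈ l.foldl (fun g p => pvGAdd g p.2 p.1) g, q.2 ≠ [] := by
  induction l generalizing g with
  | nil => exact hg
  | cons h t ih => exact ih _ (pvGAdd_snd_ne_nil g h.2 h.1 hg)

theorem pvGAdd_ne_nil (g : List (String × List String)) (r n : String) :
    pvGAdd g r n ≠ [] := by
  cases g with
  | nil => simp [pvGAdd]
  | cons h t =>
    obtain ⟨a, ns⟩ := h
    by_cases hr : (a == r) = true <;> simp [pvGAdd, hr]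

theorem foldl_ne_nil (l : List (String × String)) (g : List (String × List String))
    (hg : g ≠ []) : l.foldl (fun g p => pvGAdd g p.2 p.1) g ≠ [] := by
  induction l generalizing g with
  | nil => exact hg
  | cons h t ih => exact ih _ (pvGAdd_ne_nil g h.2 h.1)

-- lookup in the grouping dict
def pvLookG (g : List (String × List String)) (r : String) : List String :=
  ((g.find? (fun q => q.1 == r)).map Prod.snd).getD []

theorem pvLookG_pvGAdd (g : List (String × List String)) (a n r : String) :
    pvLookG (pvGAdd g a n) r
      = if (a == r) = true then pvLookG g r ++ [n] else pvLookG g r := by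
  induction g with
  | nil =>
    by_cases hr : (a == r) = true
    · have : a = r := by simpa using hr
      simp [pvGAdd, pvLookG, this]
    · simp [pvGAdd, pvLookG, hr]
  | cons h t ih =>
    obtain ⟨b, ns⟩ := h
    by_cases hb : (b == a) = true
    · have hba : b = a := by simpa using hb
      subst hba
      by_cases hr : (b == r) = true
      · simp [pvGAdd, pvLookG, hr, List.find?]
      · simp [pvGAdd, pvLookG, hr, List.find?]
    · simp only [pvGAdd, if_neg hb]
      by_cases hr : (b == r) = true
      · have har : ¬ (a == r) = true := by
          intro he
          apply hb
          have h1 : b = r := by simpa using hr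
          have h2 : a = r := by simpa using he
          simp [h1, h2]
        simp [pvLookG, List.find?, hr, har]
      · simp only [pvLookG, List.find?, hr]
        exact ih

theorem pvLookG_foldl (l : List (String × String)) (g : List (String × List String)) (r : String) :
    pvLookG (l.foldl (fun g p => pvGAdd g p.2 p.1) g) r
      = pvLookG g r ++ (l.filter (fun p => p.2 == r)).map Prod.fst := by
  induction l generalizing g with
  | nil => simp
  | cons h t ih =>
    simp only [List.foldl_cons, ih, pvLookG_pvGAdd]
    by_cases hr : (h.2 == r) = true
    · simp [hr, List.append_assoc]
    · simp [hr]

-- keys of the grouping dict stay distinct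
theorem keys_pvGAdd (g : List (String × List String)) (r n : String) :
    (pvGAdd g r n).map Prod.fst
      = if (g.any fun q => q.1 == r) = true then g.map Prod.fst else g.map Prod.fst ++ [r] := by
  induction g with
  | nil => simp [pvGAdd]
  | cons h t ih =>
    obtain ⟨a, ns⟩ := h
    by_cases hr : (a == r) = true
    · simp [pvGAdd, hr]
    · simp only [pvGAdd, if_neg hr, List.map_cons, List.any_cons]
      by_cases hany : (t.any fun q => q.1 == r) = true <;>
        · rw [ih]; simp [hany]; try simpa using hr

theorem nodup_keys_pvGAdd (g : List (String × List String)) (r n : String)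
    (hg : (g.map Prod.fst).Nodup) : ((pvGAdd g r n).map Prod.fst).Nodup := by
  rw [keys_pvGAdd]
  by_cases hany : (g.any fun q => q.1 == r) = true
  · simpa [hany]
  · simp only [hany]
    refine List.Nodup.append hg (List.nodup_singleton r) ?_
    intro x hx hxr
    simp only [List.mem_singleton] at hxr
    subst hxr
    obtain ⟨q, hq, hq1⟩ := List.mem_map.mp hx
    exact hany (List.any_eq_true.mpr ⟨q, hq, by simp [hq1]⟩)

theorem nodup_keys_foldl (l : List (String × String)) (g : List (String × List String))
    (hg : (g.map Prod.fst).Nodup) :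
    ((l.foldl (fun g p => pvGAdd g p.2 p.1) g).map Prod.fst).Nodup := by
  induction l generalizing g with
  | nil => exact hg
  | cons h t ih => exact ih _ (nodup_keys_pvGAdd g h.2 h.1 hg)

-- foldl max over all-ones is one
theorem foldl_max_ones (t : List Int) (ht : ∀ v ∈ t, v = 1) : t.foldl max 1 = 1 := by
  induction t with
  | nil => rfl
  | cons h t ih =>
    have h1 : h = 1 := ht h (List.mem_cons_self ..)
    simp only [List.foldl_cons, h1, max_self]
    exact ih (fun v hv => ht v (List.mem_cons_of_mem _ hv))

-- A's manual '='-join with the trailing character chopped equals str.join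
theorem chars_foldl_join (xs : List (List Char)) (hxs : xs ≠ []) :
    (xs.foldl (fun acc cs => acc ++ cs ++ ['=']) []).dropLast
      = PySem.Chars.join ['='] xs := by
  have key : ∀ (xs : List (List Char)) (acc : List Char),
      xs.foldl (fun acc cs => acc ++ cs ++ ['=']) acc
        = acc ++ (xs.map (fun cs => cs ++ ['='])).flatten := by
    intro xs
    induction xs with
    | nil => simp
    | cons h t ih => intro acc; simp [List.append_assoc]
  rw [key]
  simp only [List.nil_append]
  induction xs with
  | nil => exact absurd rfl hxs
  | cons h t ih =>
    cases t with
    | nil => simp [PySem.Chars.join_singleton]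
    | cons b t' =>
      rw [PySem.Chars.join_cons_cons]
      have hne : ((List.map (fun cs => cs ++ ['=']) (b :: t')).flatten) ≠ [] := by
        simp
      have hsplit : h ++ ['='] ++ b ++ ['='] ++ (List.map (fun cs => cs ++ ['=']) t').flatten
          = (h ++ ['=']) ++ (List.map (fun cs => cs ++ ['=']) (b :: t')).flatten := by
        simp [List.append_assoc]
      simp only [List.map_cons, List.flatten_cons, ← List.append_assoc]
      rw [hsplit, List.dropLast_append_of_ne_nil hne, ih (by simp)]

theorem str_foldl_join (xs : List String) (hxs : xs ≠ []) :
    PySem.Str.slice (xs.foldl (fun acc card => acc ++ card ++ "=") "") none (some (-1))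
      = PySem.Str.join "=" xs := by
  apply String.toList_inj.mp
  rw [PySem.Str.slice_to_neg_one, PySem.Str.toList_join]
  have key : ∀ (xs : List String) (acc : String),
      (xs.foldl (fun acc card => acc ++ card ++ "=") acc).toList
        = (xs.map String.toList).foldl (fun acc cs => acc ++ cs ++ ['=']) acc.toList := by
    intro xs
    induction xs with
    | nil => intro acc; simp
    | cons h t ih =>
      intro acc
      simp only [List.foldl_cons, List.map_cons, ih, String.toList_append]
      congr 1
  rw [key]
  have : ("" : String).toList = [] := rfl
  rw [this]
  have h2 : ("=" : String).toList = ['='] := rfl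
  rw [h2]
  exact chars_foldl_join (xs.map String.toList) (by simpa using hxs)

-- ===== VERDICT (by name: the statement is the Claim_ definition above) =====
theorem the_same_values_in_list_th_spec : Claim_equal_the_same_values_in_list_th := by
  intro l _ hpre
  obtain ⟨hne, hnd⟩ := hpre
  unfold Spec_the_same_values_in_list_th the_same_values_in_list_th the_same_values_in_list_th_alt
  have hdic : l.foldl (fun d value =>
      let r := pvLookup l value.1
      if d.any (fun p => p.1 == r) then pvIncr d r else d ++ [(r, 1)]) []
      = (l.foldl (fun g p => pvGAdd g p.2 p.1) []).map pvLen := by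
    rw [PySem.List.foldl_congr_mem l _ (fun d p => pvCStep d p.2) []
      (by
        intro d p hp
        have hf : l.find? (fun q => q.1 == p.1) = some p := pvFind?_of_nodup l p hnd hp
        simp only [pvLookup, pvCStep, hf, Option.map_some, Option.getD_some]), mapLen_foldl]
    rfl
  simp only [hdic]
  cases hl : (l.foldl (fun g p => pvGAdd g p.2 p.1) []).find? (fun q => decide (q.2.length > 1)) with
  | none =>
    have hall := List.find?_eq_none.mp hl
    have hnenil : ∀ q ∈ l.foldl (fun g p => pvGAdd g p.2 p.1) [], q.2 ≠ [] :=
      foldl_snd_ne_nil l [] (by simp)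
    have hone : ∀ q ∈ l.foldl (fun g p => pvGAdd g p.2 p.1) [], q.2.length = 1 := by
      intro q hq
      have h1 := hall q hq
      have h2 := hnenil q hq
      have h3 : q.2.length ≠ 0 := by simpa using h2
      simp only [decide_eq_true_eq] at h1
      omega
    have hgne : (l.foldl (fun g p => pvGAdd g p.2 p.1) []) ≠ [] := by
      cases l with
      | nil => exact absurd rfl hne
      | cons h t => exact foldl_ne_nil t _ (by simp [pvGAdd])
    obtain ⟨q0, gt, hgq⟩ := List.exists_cons_of_ne_nil hgne
    have hmax : PySem.List.max?
        (((l.foldl (fun g p => pvGAdd g p.2 p.1) []).map pvLen).map Prod.snd) (fun v => v)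
        = some 1 := by
      rw [hgq]
      simp only [List.map_cons]
      rw [PySem.List.max?_id_cons]
      have hq0 : (pvLen q0).2 = 1 := by
        have := hone q0 (by rw [hgq]; exact List.mem_cons_self ..)
        simp [pvLen, this]
      rw [hq0]
      congr 1
      apply foldl_max_ones
      intro v hv
      obtain ⟨p, hp, rfl⟩ := List.mem_map.mp hv
      obtain ⟨q, hq, rfl⟩ := List.mem_map.mp hp
      have := hone q (by rw [hgq]; exact List.mem_cons_of_mem _ hq)
      simp [pvLen, this]
    simp only [hmax]
    norm_num
  | some q =>
    have hqmem : q ∈ l.foldl (fun g p => pvGAdd g p.2 p.1) [] := List.mem_of_find?_eq_some hl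
    have hqlen : 1 < q.2.length := by
      have := List.find?_some hl
      simpa using this
    have hvmem : ((q.2.length : Int)) ∈
        ((l.foldl (fun g p => pvGAdd g p.2 p.1) []).map pvLen).map Prod.snd :=
      List.mem_map.mpr ⟨pvLen q, List.mem_map.mpr ⟨q, hqmem, rfl⟩, rfl⟩
    obtain ⟨m, hm⟩ : ∃ m, PySem.List.max?
        (((l.foldl (fun g p => pvGAdd g p.2 p.1) []).map pvLen).map Prod.snd) (fun v => v)
        = some m := by
      cases hmx : PySem.List.max?
          (((l.foldl (fun g p => pvGAdd g p.2 p.1) []).map pvLen).map Prod.snd) (fun v => v) with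
      | none =>
        rw [PySem.List.max?_eq_none_iff] at hmx
        rw [hmx] at hvmem
        cases hvmem
      | some m => exact ⟨m, rfl⟩
    have hle := PySem.List.max?_isMax hm _ hvmem
    have hm1 : ¬ (m == 1) = true := by
      intro h
      have hm1' : m = 1 := by simpa using h
      rw [hm1'] at hle
      have hcast : (1 : Int) < (q.2.length : Int) := by exact_mod_cast hqlen
      omega
    obtain ⟨v0, hv0⟩ : ∃ v0,
        ((((l.foldl (fun g p => pvGAdd g p.2 p.1) []).map pvLen).map Prod.snd).find?
          (fun v => decide (v ≠ 1))) = some v0 := by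
      cases hf : ((((l.foldl (fun g p => pvGAdd g p.2 p.1) []).map pvLen).map Prod.snd).find?
          (fun v => decide (v ≠ 1))) with
      | none =>
        have h1 := List.find?_eq_none.mp hf _ hvmem
        simp only [decide_eq_true_eq, not_not] at h1
        have hcast : (1 : Int) < (q.2.length : Int) := by exact_mod_cast hqlen
        omega
      | some v0 => exact ⟨v0, rfl⟩
    have hhead : ((((l.foldl (fun g p => pvGAdd g p.2 p.1) []).map pvLen).filter
        (fun p => decide (1 < p.2))).map Prod.fst).head?.getD "" = q.1 := by
      rw [List.filter_map]
      have hcomp : ((fun p : String × Int => decide (1 < p.2)) ∘ pvLen)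
          = (fun q : String × List String => decide (q.2.length > 1)) := by
        funext x
        simp only [Function.comp, pvLen, gt_iff_lt, decide_eq_decide]
        exact ⟨fun h => by exact_mod_cast h, fun h => by exact_mod_cast h⟩
      rw [hcomp]
      have hflt : ((l.foldl (fun g p => pvGAdd g p.2 p.1) []).filter
          (fun q : String × List String => decide (q.2.length > 1))).head? = some q := by
        rw [List.head?_filter, hl]
      rw [List.map_map, List.head?_map, hflt]
      rfl
    have hname : (l.filter (fun p => p.2 == q.1)).map Prod.fst = q.2 := by
      have h1 := pvLookG_foldl l [] q.1
      have hndg := nodup_keys_foldl l ([] : List (String × List String)) (by simp)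
      have h2 : (l.foldl (fun g p => pvGAdd g p.2 p.1) []).find? (fun p => p.1 == q.1) = some q :=
        pvFind?_of_nodup _ q hndg hqmem
      have h3 : pvLookG (l.foldl (fun g p => pvGAdd g p.2 p.1) []) q.1 = q.2 := by
        simp [pvLookG, h2]
      rw [h3] at h1
      simp only [pvLookG, List.find?_nil, Option.map_none, Option.getD_none,
        List.nil_append] at h1
      exact h1.symm
    have hsne : q.2 ≠ [] := by
      intro h
      rw [h] at hqlen
      simp at hqlen
    have hstr := str_foldl_join (PySem.List.sorted q.2 (fun x => x) false)
      (by rw [ne_eq, PySem.List.sorted_eq_nil_iff]; exact hsne)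
    simp only [hm, if_neg hm1, hv0, hhead, hname, hstr]
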